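-- pv_equiv track=rewrite | github.com/adminstrator1999/blind_75 | sliding_window/limited_divisible_sublist_problem.py | count_unique_sublist
-- ===== SOURCE A (Python) =====
-- def count_unique_sublist(nums: [int], limit: int, divisor: int):
--     unique_sublists = set()
--     left, num_divisible = 0, 0
--
--     for right in range(len(nums)):
--
--         # to check if number is divisible by divisor
--         if nums[right] % divisor == 0:
--             num_divisible += 1
--
--         # need to check if number of divisible elements are not bigger than the limit
--         while num_divisible > limit:
--             if nums[left] % divisor == 0:
--                 num_divisible -= 1
--             left += 1
--
--         # need to update the count of unique sublists till it reaches to right pointer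
--         for tmp in range(left, right + 1):
--             unique_sublists.add(tuple(nums[tmp: right + 1]))
--
--     return len(unique_sublists)
-- ===== SOURCE B (Python) =====
-- def count_unique_sublist(nums: [int], limit: int, divisor: int):
--     # Distinct contiguous sublists are determined by their contents, and the number of
--     # divisible elements of a sublist depends only on its contents; so a distinct sublist
--     # is counted iff its own divisible-count is <= limit.  Enumerate per start index,
--     # extending to the right and breaking as soon as the count exceeds the limit.
--     seen = set()
--     n = len(nums)
--     for i in range(n):
--         cnt = 0
--         t = ()
--         for j in range(i, n):
--             if nums[j] % divisor == 0:
--                 cnt += 1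
--             if cnt > limit:
--                 break
--             t = t + (nums[j],)
--             seen.add(t)
--     return len(seen)
-- ===== Notes on version B (the rewrite author's own statement) =====
-- stated objective: simpler
-- what changed: B drops A's sliding-window left pointer and re-slicing inner loop entirely: since the divisible-count of a sublist depends only on its contents, B enumerates sublists per start index, extending one element at a time and breaking once the count exceeds the limit, collecting them in one set.
import Mathlib
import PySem

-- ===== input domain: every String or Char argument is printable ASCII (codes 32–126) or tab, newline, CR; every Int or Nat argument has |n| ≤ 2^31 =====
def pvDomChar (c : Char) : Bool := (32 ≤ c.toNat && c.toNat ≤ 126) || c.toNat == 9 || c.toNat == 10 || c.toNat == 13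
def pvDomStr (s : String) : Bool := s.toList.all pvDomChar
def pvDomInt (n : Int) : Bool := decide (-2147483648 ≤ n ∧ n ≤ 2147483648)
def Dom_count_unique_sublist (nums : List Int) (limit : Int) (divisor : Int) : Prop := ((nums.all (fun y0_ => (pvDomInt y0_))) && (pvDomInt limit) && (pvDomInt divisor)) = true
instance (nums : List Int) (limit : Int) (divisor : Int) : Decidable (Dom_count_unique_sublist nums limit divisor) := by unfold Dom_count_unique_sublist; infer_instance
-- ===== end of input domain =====

-- B replaces A's sliding window + per-right re-slicing by a per-start extension with an
-- early break; objective: simpler (no left-pointer bookkeeping). Not measured faster.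

-- ===== PORT A =====
-- A's 'while num_divisible > limit' loop; Python raises IndexError when left runs past the
-- end (possible only outside Pre_), so the recursion also stops at left = len(nums).
def aWhile (nums : List Int) (limit divisor : Int) (left : Nat) (nd : Int) : Nat × Int :=
  if h : limit < nd ∧ left < nums.length then
    aWhile nums limit divisor (left + 1)
      (if PySem.Int.mod (PySem.List.pyGetD nums (left : Int) 0) divisor = 0 then nd - 1 else nd)
  else (left, nd)
termination_by nums.length - left
decreasing_by omega

-- the body of A's 'for right in range(len(nums))' loop, acting on the state
-- (unique_sublists, left, num_divisible)
def aStep (nums : List Int) (limit divisor : Int) (st : PySem.Set (List Int) × Nat × Int)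
    (right : Nat) : PySem.Set (List Int) × Nat × Int :=
  let nd1 := if PySem.Int.mod (PySem.List.pyGetD nums (right : Int) 0) divisor = 0
             then st.2.2 + 1 else st.2.2
  let lw := aWhile nums limit divisor st.2.1 nd1
  let s' := (List.range' lw.1 (right + 1 - lw.1)).foldl
    (fun s (tmp : Nat) => PySem.Set.add s (PySem.List.slice nums (some (tmp : Int)) (some ((right : Int) + 1)))) st.1
  (s', lw.1, lw.2)

def count_unique_sublist (nums : List Int) (limit : Int) (divisor : Int) : Int :=
  (((List.range nums.length).foldl (aStep nums limit divisor)
    (([] : PySem.Set (List Int)), (0 : Nat), (0 : Int))).1.length : Int)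

-- ===== PORT B =====
-- B's inner 'for j in range(i, n)' loop with its break; cnt, t, seen as in Source B.
def bInner (nums : List Int) (limit divisor : Int) (j : Nat) (cnt : Int) (t : List Int)
    (seen : PySem.Set (List Int)) : PySem.Set (List Int) :=
  if h : j < nums.length then
    let cnt' := if PySem.Int.mod (PySem.List.pyGetD nums (j : Int) 0) divisor = 0
                then cnt + 1 else cnt
    if limit < cnt' then seen
    else
      let t' := t ++ [PySem.List.pyGetD nums (j : Int) 0]
      bInner nums limit divisor (j + 1) cnt' t' (PySem.Set.add seen t')
  else seen
termination_by nums.length - j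
decreasing_by omega

def count_unique_sublist_alt (nums : List Int) (limit : Int) (divisor : Int) : Int :=
  (((List.range nums.length).foldl (fun seen i => bInner nums limit divisor i 0 [] seen)
    ([] : PySem.Set (List Int))).length : Int)

-- ===== PRECONDITION & SPEC =====
-- Pre_ excludes exactly the inputs where the Python A raises: divisor = 0 (ZeroDivisionError),
-- and limit < 0 with nonempty nums (the shrink loop runs off the end: IndexError).
def Pre_count_unique_sublist (nums : List Int) (limit : Int) (divisor : Int) : Prop :=
  divisor ≠ 0 ∧ (0 ≤ limit ∨ nums = [])
instance (nums : List Int) (limit : Int) (divisor : Int) : Decidable (Pre_count_unique_sublist nums limit divisor) := by unfold Pre_count_unique_sublist; infer_instance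

def pvWitness_count_unique_sublist : List Int × Int × Int := ([2, 3, 4], 1, 2)

def Spec_count_unique_sublist (nums : List Int) (limit : Int) (divisor : Int) (out : Int) : Prop := out = count_unique_sublist_alt nums limit divisor
instance (nums : List Int) (limit : Int) (divisor : Int) (out : Int) : Decidable (Spec_count_unique_sublist nums limit divisor out) := by unfold Spec_count_unique_sublist; infer_instance

-- ===== CLAIM (what is proved, stated in full; the proofs are below) =====
def Claim_equal_count_unique_sublist : Prop := ∀ (nums : List Int) (limit : Int) (divisor : Int), Dom_count_unique_sublist nums limit divisor → Pre_count_unique_sublist nums limit divisor → Spec_count_unique_sublist nums limit divisor (count_unique_sublist nums limit divisor)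


-- ===== LEMMAS AND PROOFS =====

-- the number of divisible elements of a sublist (depends only on the contents)
def cntDiv (divisor : Int) (t : List Int) : Int :=
  ((t.filter (fun x => PySem.Int.mod x divisor = 0)).length : Int)

-- the contiguous segment of length m starting at i
def seg (nums : List Int) (i m : Nat) : List Int := (nums.drop i).take m

lemma cntDiv_append (divisor : Int) (a b : List Int) :
    cntDiv divisor (a ++ b) = cntDiv divisor a + cntDiv divisor b := by
  simp [cntDiv, List.filter_append]

lemma cntDiv_nonneg (divisor : Int) (t : List Int) : 0 ≤ cntDiv divisor t := by
  exact Int.natCast_nonneg _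

lemma seg_succ_right (nums : List Int) (i m : Nat) (h : i + m < nums.length) :
    seg nums i (m + 1) = seg nums i m ++ [nums[i + m]] := by
  have hm : m < (nums.drop i).length := by simp; omega
  simp [seg, List.take_add_one, List.getElem?_eq_getElem hm]

lemma seg_cons_left (nums : List Int) (i m : Nat) (h : i < nums.length) :
    seg nums i (m + 1) = nums[i] :: seg nums (i + 1) m := by
  simp only [seg]
  rw [List.drop_eq_getElem_cons h, List.take_succ_cons]

lemma cntDiv_seg_mono (nums : List Int) (divisor : Int) (i : Nat) {m m' : Nat} (h : m ≤ m') :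
    cntDiv divisor (seg nums i m) ≤ cntDiv divisor (seg nums i m') := by
  obtain ⟨k, rfl⟩ := Nat.exists_eq_add_of_le h
  rw [seg, seg, List.take_add, cntDiv_append]
  have := cntDiv_nonneg divisor (((nums.drop i).drop m).take k)
  omega

-- count of divisibles of the window [a, e)
def W (nums : List Int) (divisor : Int) (a e : Nat) : Int := cntDiv divisor (seg nums a (e - a))

lemma cntDiv_cons_ge (divisor : Int) (x : Int) (l : List Int) :
    cntDiv divisor l ≤ cntDiv divisor (x :: l) := by
  have : (x :: l) = [x] ++ l := rfl
  rw [this, cntDiv_append]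
  have := cntDiv_nonneg divisor [x]
  omega

lemma W_succ_left (nums : List Int) (divisor : Int) {a e : Nat} (h2 : a < e)
    (h3 : e ≤ nums.length) : W nums divisor (a + 1) e ≤ W nums divisor a e := by
  have ha : a < nums.length := by omega
  have hd : e - a = (e - (a + 1)) + 1 := by omega
  rw [W, W, hd, seg_cons_left nums a _ ha]
  exact cntDiv_cons_ge divisor _ _

lemma W_anti (nums : List Int) (divisor : Int) {a a' e : Nat} (h1 : a ≤ a') (h2 : a' ≤ e)
    (h3 : e ≤ nums.length) : W nums divisor a' e ≤ W nums divisor a e := by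
  obtain ⟨d, rfl⟩ := Nat.exists_eq_add_of_le h1
  clear h1
  induction d generalizing a with
  | zero => simp
  | succ d ih =>
    have step : W nums divisor (a + 1) e ≤ W nums divisor a e := W_succ_left nums divisor (by omega) h3
    have : W nums divisor (a + 1 + d) e ≤ W nums divisor (a + 1) e := by
      have := ih (a := a + 1) (by omega)
      omega
    have he : a + (d + 1) = a + 1 + d := by omega
    rw [he]
    omega

-- segments are distinguished by their own data: used to convert memberships
def Q (nums : List Int) (limit divisor : Int) (y : List Int) : Prop :=
  ∃ i e : Nat, i < e ∧ e ≤ nums.length ∧ W nums divisor i e ≤ limit ∧ y = seg nums i (e - i)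

-- generic fold lemmas
lemma mem_foldl_step {α : Type} [BEq α] [LawfulBEq α] (l : List Nat)
    (f : PySem.Set α → Nat → PySem.Set α) (P : Nat → α → Prop) (s : PySem.Set α) (y : α) :
    (∀ s i y, i ∈ l → (y ∈ f s i ↔ y ∈ s ∨ P i y)) →
    (y ∈ l.foldl f s ↔ y ∈ s ∨ ∃ i ∈ l, P i y) := by
  induction l generalizing s with
  | nil => simp
  | cons a l ih =>
    intro hf
    rw [List.foldl_cons, ih _ (fun s i y hi => hf s i y (List.mem_cons_of_mem a hi)),
       hf s a y (List.mem_cons_self)]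
    simp only [List.mem_cons]
    constructor
    · rintro (⟨h | h⟩ | ⟨i, hi, hp⟩)
      · exact Or.inl h
      · exact Or.inr ⟨a, Or.inl rfl, h⟩
      · exact Or.inr ⟨i, Or.inr hi, hp⟩
    · rintro (h | ⟨i, rfl | hi, hp⟩)
      · exact Or.inl (Or.inl h)
      · exact Or.inl (Or.inr hp)
      · exact Or.inr ⟨i, hi, hp⟩

lemma nodup_foldl_step {α : Type} (l : List Nat) (f : List α → Nat → List α)
    (hf : ∀ s i, s.Nodup → (f s i).Nodup) (s : List α) (hs : s.Nodup) :
    (l.foldl f s).Nodup := by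
  induction l generalizing s with
  | nil => exact hs
  | cons a l ih => exact ih (f s a) (hf s a hs)

lemma nodup_foldl_add {α : Type} [BEq α] [LawfulBEq α] (l : List Nat) (g : Nat → α)
    (s : PySem.Set α) (hs : s.Nodup) :
    (l.foldl (fun s i => PySem.Set.add s (g i)) s).Nodup := by
  exact nodup_foldl_step l _ (fun s i h => PySem.Set.nodup_add s (g i) h) s hs

-- ---- B side ----
lemma bInner_mem (nums : List Int) (limit divisor : Int) (i : Nat) :
    ∀ (j : Nat) (cnt : Int) (t : List Int) (seen : PySem.Set (List Int)),
      i ≤ j → j ≤ nums.length → t = seg nums i (j - i) → cnt = cntDiv divisor t →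
      ∀ y, y ∈ bInner nums limit divisor j cnt t seen ↔
        y ∈ seen ∨ ∃ m, j - i < m ∧ i + m ≤ nums.length ∧
          cntDiv divisor (seg nums i m) ≤ limit ∧ y = seg nums i m := by
  suffices H : ∀ (d j : Nat), nums.length - j = d → ∀ (cnt : Int) (t : List Int)
      (seen : PySem.Set (List Int)), i ≤ j → j ≤ nums.length → t = seg nums i (j - i) →
      cnt = cntDiv divisor t → ∀ y,
      (y ∈ bInner nums limit divisor j cnt t seen ↔
        y ∈ seen ∨ ∃ m, j - i < m ∧ i + m ≤ nums.length ∧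
          cntDiv divisor (seg nums i m) ≤ limit ∧ y = seg nums i m) by
    intro j cnt t seen h1 h2 h3 h4 y
    exact H (nums.length - j) j rfl cnt t seen h1 h2 h3 h4 y
  intro d
  induction d with
  | zero =>
    intro j hdj cnt t seen hij hjn ht hcnt y
    rw [bInner, dif_neg (by omega)]
    constructor
    · exact Or.inl
    · rintro (h | ⟨m, hm1, hm2, -, -⟩)
      · exact h
      · omega
  | succ d ih =>
    intro j hdj cnt t seen hij hjn ht hcnt y
    obtain ⟨k, rfl⟩ := Nat.exists_eq_add_of_le hij
    have hk : i + k - i = k := by omega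
    have hk1 : i + k + 1 - i = k + 1 := by omega
    rw [hk] at ht
    have hjn' : i + k < nums.length := by omega
    have hx : PySem.List.pyGetD nums ((i + k : Nat) : Int) 0 = nums[i + k] := by
      rw [PySem.List.pyGetD_natCast]
      exact List.getD_eq_getElem nums 0 hjn'
    have hseg : seg nums i (k + 1) = t ++ [nums[i + k]] := by
      rw [seg_succ_right nums i k (by omega), ← ht]
    have hcnt' : cntDiv divisor (seg nums i (k + 1)) =
        (if PySem.Int.mod nums[i + k] divisor = 0 then cnt + 1 else cnt) := by
      rw [hseg, cntDiv_append, hcnt]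
      by_cases hmod : PySem.Int.mod nums[i + k] divisor = 0 <;> simp [cntDiv, hmod]
    rw [bInner]
    simp only [dif_pos hjn', hx, hk]
    by_cases hC : limit < (if PySem.Int.mod nums[i + k] divisor = 0 then cnt + 1 else cnt)
    · rw [if_pos hC]
      constructor
      · exact Or.inl
      · rintro (h | ⟨m, hm1, hm2, hm3, -⟩)
        · exact h
        · have hmono := cntDiv_seg_mono nums divisor i (show k + 1 ≤ m by omega)
          rw [hcnt'] at hmono
          omega
    · rw [if_neg hC,
        ih (i + k + 1) (by omega) _ (t ++ [nums[i + k]]) _ (by omega) (by omega)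
          (by rw [hk1, hseg]) (by rw [← hcnt', hseg]), PySem.Set.mem_add, hk1]
      constructor
      · rintro ((h | h) | ⟨m, h1, h2, h3, h4⟩)
        · exact Or.inl h
        · exact Or.inr ⟨k + 1, by omega, by omega, by rw [hcnt']; omega, by rw [hseg]; exact h⟩
        · exact Or.inr ⟨m, by omega, h2, h3, h4⟩
      · rintro (h | ⟨m, h1, h2, h3, h4⟩)
        · exact Or.inl (Or.inl h)
        · by_cases hm : m = k + 1
          · subst hm
            exact Or.inl (Or.inr (by rw [← hseg]; exact h4))
          · exact Or.inr ⟨m, by omega, h2, h3, h4⟩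

lemma bInner_nodup (nums : List Int) (limit divisor : Int) :
    ∀ (j : Nat) (cnt : Int) (t : List Int) (seen : PySem.Set (List Int)),
      seen.Nodup → (bInner nums limit divisor j cnt t seen).Nodup := by
  suffices H : ∀ (d j : Nat), nums.length - j = d → ∀ (cnt : Int) (t : List Int)
      (seen : PySem.Set (List Int)), seen.Nodup → (bInner nums limit divisor j cnt t seen).Nodup by
    intro j cnt t seen h
    exact H (nums.length - j) j rfl cnt t seen h
  intro d
  induction d with
  | zero =>
    intro j hdj cnt t seen h
    rw [bInner, dif_neg (by omega)]
    exact h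
  | succ d ih =>
    intro j hdj cnt t seen h
    have hjn' : j < nums.length := by omega
    rw [bInner]
    simp only [dif_pos hjn']
    split_ifs with h1 h2 h3
    · exact h
    · exact ih (j + 1) (by omega) _ _ _ (PySem.Set.nodup_add seen _ h)
    · exact h
    · exact ih (j + 1) (by omega) _ _ _ (PySem.Set.nodup_add seen _ h)

lemma B_char (nums : List Int) (limit divisor : Int) (y : List Int) :
    y ∈ (List.range nums.length).foldl (fun seen i => bInner nums limit divisor i 0 [] seen)
        ([] : PySem.Set (List Int)) ↔ Q nums limit divisor y := by
  rw [mem_foldl_step (List.range nums.length) _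
      (fun i y => ∃ m, 0 < m ∧ i + m ≤ nums.length ∧
        cntDiv divisor (seg nums i m) ≤ limit ∧ y = seg nums i m) _ y ?hf]
  case hf =>
    intro s i y hi
    have hi' : i < nums.length := List.mem_range.mp hi
    have := bInner_mem nums limit divisor i i 0 [] s (le_refl i) (by omega)
      (by simp [seg]) (by simp [cntDiv]) y
    simpa using this
  simp only [List.mem_range, List.not_mem_nil, false_or]
  constructor
  · rintro ⟨i, hi, m, hm0, hmn, hcnt, hy⟩
    exact ⟨i, i + m, by omega, hmn, by rw [W]; simp only [Nat.add_sub_cancel_left]; exact hcnt,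
      by simp only [Nat.add_sub_cancel_left]; exact hy⟩
  · rintro ⟨i, e, hie, hen, hw, hy⟩
    exact ⟨i, by omega, e - i, by omega, by omega, by rw [W] at hw; exact hw, hy⟩

lemma B_nodup (nums : List Int) (limit divisor : Int) :
    ((List.range nums.length).foldl (fun seen i => bInner nums limit divisor i 0 [] seen)
      ([] : PySem.Set (List Int))).Nodup := by
  exact nodup_foldl_step _ _ (fun s i h => bInner_nodup nums limit divisor i 0 [] s h) _
    List.nodup_nil

-- ---- A side ----
lemma aWhile_spec (nums : List Int) (limit divisor : Int) (hlim : 0 ≤ limit) (e : Nat)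
    (he : e ≤ nums.length) :
    ∀ (left : Nat) (nd : Int), left ≤ e → nd = W nums divisor left e →
      (aWhile nums limit divisor left nd).1 ≤ e ∧
      left ≤ (aWhile nums limit divisor left nd).1 ∧
      (aWhile nums limit divisor left nd).2 = W nums divisor (aWhile nums limit divisor left nd).1 e ∧
      (aWhile nums limit divisor left nd).2 ≤ limit ∧
      (∀ l, left ≤ l → l < (aWhile nums limit divisor left nd).1 → limit < W nums divisor l e) := by
  suffices H : ∀ (d left : Nat), e - left = d → ∀ (nd : Int), left ≤ e → nd = W nums divisor left e →
      (aWhile nums limit divisor left nd).1 ≤ e ∧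
      left ≤ (aWhile nums limit divisor left nd).1 ∧
      (aWhile nums limit divisor left nd).2 = W nums divisor (aWhile nums limit divisor left nd).1 e ∧
      (aWhile nums limit divisor left nd).2 ≤ limit ∧
      (∀ l, left ≤ l → l < (aWhile nums limit divisor left nd).1 → limit < W nums divisor l e) by
    intro left nd h1 h2
    exact H (e - left) left rfl nd h1 h2
  intro d
  induction d with
  | zero =>
    intro left hd nd hle hnd
    have hle' : left = e := by omega
    subst hle'
    have h0 : nd = 0 := by rw [hnd]; simp [W, seg, cntDiv]
    rw [aWhile, dif_neg (by intro hcon; rw [h0] at hcon; exact absurd hcon.1 (by omega))]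
    exact ⟨le_refl _, le_refl _, hnd, by omega,
      fun l hl1 hl2 => absurd (lt_of_le_of_lt hl1 hl2) (lt_irrefl _)⟩
  | succ d ih =>
    intro left hd nd hle hnd
    have hlt : left < e := by omega
    rw [aWhile]
    by_cases hc : limit < nd
    · have hln : left < nums.length := by omega
      rw [dif_pos ⟨hc, hln⟩]
      have hx : PySem.List.pyGetD nums (left : Int) 0 = nums[left] := by
        rw [PySem.List.pyGetD_natCast]
        exact List.getD_eq_getElem nums 0 hln
      have hWdec : W nums divisor left e =
          (if PySem.Int.mod nums[left] divisor = 0 then (1 : Int) else 0) +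
            W nums divisor (left + 1) e := by
        rw [W, W]
        have hd2 : e - left = (e - (left + 1)) + 1 := by omega
        rw [hd2, seg_cons_left nums left _ hln]
        by_cases hmod : PySem.Int.mod nums[left] divisor = 0
        · simp [cntDiv, hmod]
          ring
        · simp [cntDiv, hmod]
      have hnd' : (if PySem.Int.mod (PySem.List.pyGetD nums (left : Int) 0) divisor = 0
          then nd - 1 else nd) = W nums divisor (left + 1) e := by
        rw [hx, hnd, hWdec]
        split_ifs <;> ring
      obtain ⟨c1, c2, c3, c4, c5⟩ := ih (left + 1) (by omega) _ (by omega) hnd'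
      refine ⟨c1, le_trans (by omega) c2, c3, c4, ?_⟩
      intro l hl1 hl2
      rcases eq_or_lt_of_le hl1 with rfl | hl
      · rw [← hnd]
        exact hc
      · exact c5 l (by omega) hl2
    · rw [dif_neg (by intro hcon; exact hc hcon.1)]
      exact ⟨by omega, le_refl left, hnd, by omega,
        fun l hl1 hl2 => absurd (lt_of_le_of_lt hl1 hl2) (lt_irrefl _)⟩

-- the A-side invariant after processing rights 0..r-1
def InvA (nums : List Int) (limit divisor : Int) (r : Nat)
    (st : PySem.Set (List Int) × Nat × Int) : Prop :=
  st.2.1 ≤ r ∧ st.2.2 = W nums divisor st.2.1 r ∧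
  (∀ l, l < st.2.1 → limit < W nums divisor l r) ∧
  st.1.Nodup ∧
  (∀ y, y ∈ st.1 ↔ ∃ i e : Nat, i < e ∧ e ≤ r ∧ W nums divisor i e ≤ limit ∧ y = seg nums i (e - i))

lemma W_mono_right (nums : List Int) (divisor : Int) (l e : Nat) :
    W nums divisor l e ≤ W nums divisor l (e + 1) := by
  exact cntDiv_seg_mono nums divisor l (by omega)

lemma aStep_inv (nums : List Int) (limit divisor : Int) (hlim : 0 ≤ limit) (r : Nat)
    (hr : r < nums.length) (st : PySem.Set (List Int) × Nat × Int)
    (hst : InvA nums limit divisor r st) :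
    InvA nums limit divisor (r + 1) (aStep nums limit divisor st r) := by
  obtain ⟨s, left, nd⟩ := st
  obtain ⟨hle, hnd, hmin, hnodup, hmem⟩ := hst
  simp only at hle hnd hmin hnodup hmem
  obtain ⟨k, rfl⟩ := Nat.exists_eq_add_of_le hle
  have hx : PySem.List.pyGetD nums ((left + k : Nat) : Int) 0 = nums[left + k] := by
    rw [PySem.List.pyGetD_natCast]
    exact List.getD_eq_getElem nums 0 hr
  have hW1 : (if PySem.Int.mod (PySem.List.pyGetD nums ((left + k : Nat) : Int) 0) divisor = 0
      then nd + 1 else nd) = W nums divisor left (left + k + 1) := by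
    rw [hx, hnd, W, W, Nat.add_sub_cancel_left]
    have h1 : left + k + 1 - left = k + 1 := by omega
    rw [h1, seg_succ_right nums left k hr, cntDiv_append]
    by_cases hmod : PySem.Int.mod nums[left + k] divisor = 0
    · simp [cntDiv, hmod]
    · simp [cntDiv, hmod]
  obtain ⟨c1, c2, c3, c4, c5⟩ := aWhile_spec nums limit divisor hlim (left + k + 1) (by omega)
    left _ (by omega) hW1
  have hminfull : ∀ l, l < (aWhile nums limit divisor left
      (if PySem.Int.mod (PySem.List.pyGetD nums ((left + k : Nat) : Int) 0) divisor = 0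
       then nd + 1 else nd)).1 → limit < W nums divisor l (left + k + 1) := by
    intro l hl
    by_cases hll : l < left
    · have h1 := hmin l hll
      have h2 := W_mono_right nums divisor l (left + k)
      omega
    · exact c5 l (by omega) hl
  unfold aStep
  dsimp only
  refine ⟨c1, c3, hminfull, ?_, ?_⟩
  · exact nodup_foldl_add _ _ _ hnodup
  · intro y
    simp only
    rw [PySem.Set.mem_foldl_add, hmem y]
    have hslice : ∀ tmp : Nat, PySem.List.slice nums (some (tmp : Int)) (some (((left + k : Nat) : Int) + 1)) =
        seg nums tmp (left + k + 1 - tmp) := by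
      intro tmp
      have hcast : ((left + k : Nat) : Int) + 1 = ((left + k + 1 : Nat) : Int) := by push_cast; ring
      rw [hcast, PySem.List.slice_natCast, seg]
    constructor
    · rintro (⟨i, e, h1, h2, h3, h4⟩ | ⟨tmp, htmp, hy⟩)
      · exact ⟨i, e, h1, by omega, h3, h4⟩
      · rw [List.mem_range'_1] at htmp
        have htmp2 : tmp < left + k + 1 := by omega
        exact ⟨tmp, left + k + 1, htmp2, le_refl _,
          le_trans (W_anti nums divisor htmp.1 (le_of_lt htmp2) (by omega))
            (by rw [← c3]; exact c4), by rw [hy, hslice]⟩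
    · rintro ⟨i, e, h1, h2, h3, h4⟩
      by_cases he : e ≤ left + k
      · exact Or.inl ⟨i, e, h1, he, h3, h4⟩
      · have he' : e = left + k + 1 := by omega
        subst he'
        have hge : (aWhile nums limit divisor left
            (if PySem.Int.mod (PySem.List.pyGetD nums ((left + k : Nat) : Int) 0) divisor = 0
             then nd + 1 else nd)).1 ≤ i := by
          by_contra hcon
          exact absurd h3 (not_le.mpr (hminfull i (by omega)))
        refine Or.inr ⟨i, ?_, by rw [hslice]; exact h4⟩
        rw [List.mem_range'_1]
        omega

lemma A_fold_inv (nums : List Int) (limit divisor : Int) (hlim : 0 ≤ limit) :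
    ∀ r, r ≤ nums.length →
      InvA nums limit divisor r ((List.range r).foldl (aStep nums limit divisor)
        (([] : PySem.Set (List Int)), (0 : Nat), (0 : Int))) := by
  intro r
  induction r with
  | zero =>
    intro _
    rw [List.range_zero, List.foldl_nil]
    refine ⟨le_refl 0, by simp [W, seg, cntDiv], fun l hl => absurd hl (Nat.not_lt_zero l), List.nodup_nil, ?_⟩
    intro y
    simp only [List.not_mem_nil, false_iff]
    rintro ⟨i, e, h1, h2, -, -⟩
    omega
  | succ r ih =>
    intro hr
    rw [List.range_succ, List.foldl_append, List.foldl_cons, List.foldl_nil]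
    exact aStep_inv nums limit divisor hlim r (by omega) _ (ih (by omega))

-- ===== VERDICT (by name: the statement is the Claim_ definition above) =====
theorem count_unique_sublist_spec : Claim_equal_count_unique_sublist := by
  intro nums limit divisor _ hpre
  unfold Spec_count_unique_sublist
  rcases hpre with ⟨-, hlim | rfl⟩
  · unfold count_unique_sublist count_unique_sublist_alt
    obtain ⟨-, -, -, hnodA, hmemA⟩ := A_fold_inv nums limit divisor hlim nums.length (le_refl _)
    have hnodB := B_nodup nums limit divisor
    have hmemB := B_char nums limit divisor
    suffices h : ((List.range nums.length).foldl (aStep nums limit divisor)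
        (([] : PySem.Set (List Int)), (0 : Nat), (0 : Int))).1.length =
        ((List.range nums.length).foldl (fun seen i => bInner nums limit divisor i 0 [] seen)
          ([] : PySem.Set (List Int))).length by
      exact_mod_cast h
    apply List.Perm.length_eq
    rw [List.perm_ext_iff_of_nodup hnodA hnodB]
    intro y
    rw [hmemA y, hmemB y]
    unfold Q
    exact Iff.rfl
  · simp [count_unique_sublist, count_unique_sublist_alt]
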